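-- pv_equiv track=rewrite | github.com/Midnwave/bfos | cogs/xp_system.py | xp_for_level
-- ===== SOURCE A (Python) =====
-- def xp_for_level(level: int, curve: str = 'scaled') -> int:
--     """Total XP required to reach a given level."""
--     if curve == 'linear':
--         return level * 100
--     elif curve == 'exponential':
--         return 50 * level * level
--     else:  # scaled (MEE6-like)
--         total = 0
--         for lvl in range(1, level + 1):
--             total += 5 * (lvl ** 2) + 50 * lvl + 100
--         return total
-- ===== SOURCE B (Python) =====
-- def xp_for_level(level: int, curve: str = 'scaled') -> int:
--     """Total XP required to reach a given level."""
--     if curve == 'linear':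
--         return level * 100
--     elif curve == 'exponential':
--         return 50 * level * level
--     else:  # scaled (MEE6-like): closed-form sum, O(1)
--         n = max(level, 0)
--         return n * (n + 1) * (2 * n + 1) * 5 // 6 + 25 * n * (n + 1) + 100 * n
-- ===== Notes on version B (the rewrite author's own statement) =====
-- stated objective: faster
-- what changed: The O(level) loop summing 5*l^2+50*l+100 is replaced by the closed-form sum-of-squares/arithmetic-series polynomial evaluated in O(1).
import Mathlib
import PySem

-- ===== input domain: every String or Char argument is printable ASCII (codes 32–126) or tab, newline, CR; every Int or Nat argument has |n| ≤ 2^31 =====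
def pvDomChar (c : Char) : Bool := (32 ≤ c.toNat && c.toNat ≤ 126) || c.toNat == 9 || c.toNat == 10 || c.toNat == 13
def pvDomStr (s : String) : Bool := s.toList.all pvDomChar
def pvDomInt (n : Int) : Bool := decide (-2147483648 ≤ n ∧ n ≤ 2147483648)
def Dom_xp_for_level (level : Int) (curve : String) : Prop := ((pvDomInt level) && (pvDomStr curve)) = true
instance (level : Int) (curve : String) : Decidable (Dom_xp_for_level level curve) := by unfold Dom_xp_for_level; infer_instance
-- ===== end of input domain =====

-- B replaces A's O(level) summation loop with the closed-form polynomial (O(1)).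

-- ===== PORT A =====
def xp_for_level (level : Int) (curve : String) : Int :=
  if curve = "linear" then level * 100
  else if curve = "exponential" then 50 * level * level
  else
    (PySem.List.pyRange 1 (level + 1) 1).foldl
      (fun total lvl => total + (5 * lvl ^ 2 + 50 * lvl + 100)) 0

-- ===== PORT B =====
def xp_for_level_alt (level : Int) (curve : String) : Int :=
  if curve = "linear" then level * 100
  else if curve = "exponential" then 50 * level * level
  else
    let n := max level 0
    PySem.Int.floordiv (n * (n + 1) * (2 * n + 1) * 5) 6 + 25 * n * (n + 1) + 100 * n

-- ===== PRECONDITION & SPEC =====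
def Spec_xp_for_level (level : Int) (curve : String) (out : Int) : Prop := out = xp_for_level_alt level curve
instance (level : Int) (curve : String) (out : Int) : Decidable (Spec_xp_for_level level curve out) := by unfold Spec_xp_for_level; infer_instance

-- ===== CLAIM (what is proved, stated in full; the proofs are below) =====
def Claim_equal_xp_for_level : Prop := ∀ (level : Int) (curve : String), Dom_xp_for_level level curve → Spec_xp_for_level level curve (xp_for_level level curve)

-- ===== LEMMAS AND PROOFS =====

lemma six_dvd_sq_sum (n : Nat) : (6 : Int) ∣ (n : Int) * (n + 1) * (2 * n + 1) := by
  induction n with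
  | zero => decide
  | succ k ih =>
    have h : ((k + 1 : Nat) : Int) * ((k + 1 : Nat) + 1) * (2 * (k + 1 : Nat) + 1)
        = (k : Int) * (k + 1) * (2 * k + 1) + 6 * ((k : Int) + 1) ^ 2 := by
      push_cast; ring
    rw [h]
    exact dvd_add ih ⟨((k : Int) + 1) ^ 2, rfl⟩

lemma foldA (n : Nat) (t : Int) :
    6 * ((PySem.List.pyRange 1 ((n : Int) + 1) 1).foldl
      (fun total lvl => total + (5 * lvl ^ 2 + 50 * lvl + 100)) t)
    = 6 * t + 10 * n ^ 3 + 165 * n ^ 2 + 755 * n := by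
  induction n with
  | zero => simp [PySem.List.pyRange_one_eq_nil]
  | succ k ih =>
    have hcast : ((k + 1 : Nat) : Int) + 1 = ((k : Int) + 1) + 1 := by push_cast; ring
    rw [hcast, PySem.List.pyRange_one_succ_right (by omega), List.foldl_append]
    simp only [List.foldl_cons, List.foldl_nil]
    have h6 : (6 : Int) * ((PySem.List.pyRange 1 ((k : Int) + 1) 1).foldl
        (fun total lvl => total + (5 * lvl ^ 2 + 50 * lvl + 100)) t
        + (5 * ((k : Int) + 1) ^ 2 + 50 * ((k : Int) + 1) + 100))
        = (6 * t + 10 * k ^ 3 + 165 * k ^ 2 + 755 * k)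
          + 6 * (5 * ((k : Int) + 1) ^ 2 + 50 * ((k : Int) + 1) + 100) := by
      rw [mul_add, ih]
    rw [h6]; push_cast; ring

lemma closedB (n : Nat) :
    6 * (PySem.Int.floordiv ((n : Int) * (n + 1) * (2 * n + 1) * 5) 6
          + 25 * n * (n + 1) + 100 * n)
    = 10 * n ^ 3 + 165 * n ^ 2 + 755 * n := by
  have hd : (6 : Int) ∣ (n : Int) * (n + 1) * (2 * n + 1) * 5 :=
    Dvd.dvd.mul_right (six_dvd_sq_sum n) 5
  rw [PySem.Int.floordiv_eq_ediv_of_pos (by norm_num)]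
  have h : (6 : Int) * (((n : Int) * (n + 1) * (2 * n + 1) * 5) / 6)
      = (n : Int) * (n + 1) * (2 * n + 1) * 5 := by
    rw [mul_comm]; exact Int.ediv_mul_cancel hd
  rw [mul_add, mul_add, h]; ring

-- ===== VERDICT (by name: the statement is the Claim_ definition above) =====
theorem xp_for_level_spec : Claim_equal_xp_for_level := by
  intro level curve _
  unfold Spec_xp_for_level xp_for_level xp_for_level_alt
  split_ifs with h1 h2
  · rfl
  · rfl
  · by_cases hl : level ≤ 0
    · rw [PySem.List.pyRange_one_eq_nil (by omega)]
      have hmax : max level 0 = 0 := max_eq_right hl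
      simp [hmax, PySem.Int.floordiv]
    · push Not at hl
      obtain ⟨n, hn⟩ : ∃ n : Nat, level = (n : Int) :=
        ⟨level.toNat, (Int.toNat_of_nonneg hl.le).symm⟩
      subst hn
      have hmax : max (n : Int) 0 = (n : Int) := max_eq_left (by positivity)
      rw [hmax]
      have hA := foldA n 0
      have hB := closedB n
      linarith
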